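-- pv_equiv track=rewrite | github.com/LBrignone/AutomaticTesting_Progetto_AeC | ElementGen/__init__.py | generateCourseIdList
-- ===== SOURCE A (Python) =====
-- import string
--
-- def generateCourseIdList(coursesGen):
--     letIdVector = []
--     for i in range(coursesGen):
--         valToTranslate = i
--         letId = '01'
--         for j in range(4, -1, -1):
--             idxAsciiTable = valToTranslate // (26**j)
--             valToTranslate = valToTranslate - (idxAsciiTable*(26**j))
--             letId = letId + string.ascii_uppercase[idxAsciiTable]
--         letIdVector.append(letId)
--     return letIdVector
-- ===== SOURCE B (Python) =====
-- import string
--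
-- def generateCourseIdList(coursesGen):
--     U = string.ascii_uppercase
--     out = []
--     d = [0, 0, 0, 0, 0]  # odometer digits, most-significant first
--     for _ in range(coursesGen):
--         out.append('01' + ''.join(U[x] for x in d))
--         for k in (4, 3, 2, 1):
--             d[k] += 1
--             if d[k] < 26:
--                 break
--             d[k] = 0
--         else:
--             d[0] += 1
--     return out
-- ===== Notes on version B (the rewrite author's own statement) =====
-- stated objective: alternative
-- what changed: B replaces A's per-item most-significant-first digit conversion with explicit powers and divisions by a single odometer digit vector incremented with carry once per item, so no division is performed at all.
import Mathlib
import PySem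

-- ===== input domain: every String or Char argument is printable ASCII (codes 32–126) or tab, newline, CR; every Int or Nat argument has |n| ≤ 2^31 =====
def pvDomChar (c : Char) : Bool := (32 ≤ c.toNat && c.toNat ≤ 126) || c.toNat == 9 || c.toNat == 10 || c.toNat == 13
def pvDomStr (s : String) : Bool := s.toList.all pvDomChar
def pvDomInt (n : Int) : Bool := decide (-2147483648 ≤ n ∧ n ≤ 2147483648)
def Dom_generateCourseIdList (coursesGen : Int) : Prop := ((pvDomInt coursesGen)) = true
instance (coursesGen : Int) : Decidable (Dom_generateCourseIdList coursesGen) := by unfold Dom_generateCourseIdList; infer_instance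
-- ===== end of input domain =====

-- B replaces the per-item digit conversion by explicit powers with an odometer
-- (increment-with-carry digit vector), removing all divisions; objective: alternative.

-- ===== PORT A =====
-- string.ascii_uppercase
def pvUpper : List Char := "ABCDEFGHIJKLMNOPQRSTUVWXYZ".toList

def generateCourseIdList (coursesGen : Int) : List String :=
  (PySem.List.pyRange 0 coursesGen 1).foldl
    (fun letIdVector i =>
      let st := (PySem.List.pyRange 4 (-1) (-1)).foldl
        (fun (st : Int × List Char) j =>
          -- j ranges over 4,3,2,1,0 so j.toNat is exact for 26**j
          let idxAsciiTable := PySem.Int.floordiv st.1 (26 ^ j.toNat)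
          -- string.ascii_uppercase[idxAsciiTable]: in range under Pre_ (pyGetD)
          (st.1 - idxAsciiTable * 26 ^ j.toNat,
           st.2 ++ [PySem.List.pyGetD pvUpper idxAsciiTable 'A']))
        (i, ['0', '1'])
      letIdVector ++ [String.ofList st.2])
    []

-- ===== PORT B =====
-- the carry loop 'for k in (4,3,2,1): … break / else: d[0] += 1' of Source B
def pvCarry (d : List Int) : List Nat → List Int
  | [] => PySem.List.pySetD d 0 (PySem.List.pyGetD d 0 0 + 1)
  | k :: ks =>
      let v := PySem.List.pyGetD d (k : Int) 0 + 1
      if v < 26 then PySem.List.pySetD d (k : Int) v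
      else pvCarry (PySem.List.pySetD d (k : Int) 0) ks

def generateCourseIdList_alt (coursesGen : Int) : List String :=
  (((PySem.List.pyRange 0 coursesGen 1).foldl
    (fun (st : List String × List Int) _ =>
      (st.1 ++ [String.ofList (['0', '1'] ++ st.2.map (fun x => PySem.List.pyGetD pvUpper x 'A'))],
       pvCarry st.2 [4, 3, 2, 1]))
    ([], [0, 0, 0, 0, 0]))).1

-- ===== PRECONDITION & SPEC =====
-- Pre_ excludes exactly the inputs above the fifth power of the alphabet size, on which
-- A raises IndexError (the un-modded top digit runs past the alphabet); B raises there too.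
def Pre_generateCourseIdList (coursesGen : Int) : Prop := coursesGen ≤ 11881376
instance (coursesGen : Int) : Decidable (Pre_generateCourseIdList coursesGen) := by unfold Pre_generateCourseIdList; infer_instance
def pvWitness_generateCourseIdList : Int := 3

def Spec_generateCourseIdList (coursesGen : Int) (out : List String) : Prop := out = generateCourseIdList_alt coursesGen
instance (coursesGen : Int) (out : List String) : Decidable (Spec_generateCourseIdList coursesGen out) := by unfold Spec_generateCourseIdList; infer_instance

-- ===== CLAIM (what is proved, stated in full; the proofs are below) =====
def Claim_equal_generateCourseIdList : Prop := ∀ (coursesGen : Int), Dom_generateCourseIdList coursesGen → Pre_generateCourseIdList coursesGen → Spec_generateCourseIdList coursesGen (generateCourseIdList coursesGen)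

-- ===== LEMMAS AND PROOFS =====

-- the digit vector of i in base twenty-six (most-significant first), shared reference point
def pvDigits (i : Int) : List Int :=
  [i / 456976, i / 17576 % 26, i / 676 % 26, i / 26 % 26, i % 26]

-- the string both programs emit for the digit vector ds
def pvRow (ds : List Int) : String :=
  String.ofList (['0', '1'] ++ ds.map (fun x => PySem.List.pyGetD pvUpper x 'A'))

-- A's inner loop over j = 4,3,2,1,0 computes exactly the digits of i
theorem pvInnerA (i : Int) :
    (PySem.List.pyRange 4 (-1) (-1)).foldl
      (fun (st : Int × List Char) j =>
        let idxAsciiTable := PySem.Int.floordiv st.1 (26 ^ j.toNat)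
        (st.1 - idxAsciiTable * 26 ^ j.toNat,
         st.2 ++ [PySem.List.pyGetD pvUpper idxAsciiTable 'A']))
      (i, ['0', '1'])
    = (0, (pvRow (pvDigits i)).toList) := by
  have hr : PySem.List.pyRange 4 (-1) (-1) = [4, 3, 2, 1, 0] := by decide
  have hf : ∀ a b : Int, 0 < b → PySem.Int.floordiv a b = a / b :=
    fun _ _ h => PySem.Int.floordiv_eq_ediv_of_pos h
  rw [hr]
  simp only [List.foldl]
  norm_num [show (26:Int) ^ Int.toNat 4 = 456976 from by decide,
    show (26:Int) ^ Int.toNat 3 = 17576 from by decide,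
    show (26:Int) ^ Int.toNat 2 = 676 from by decide,
    show (26:Int) ^ Int.toNat 1 = 26 from by decide,
    show (26:Int) ^ Int.toNat 0 = 1 from by decide,
    hf, pvRow, pvDigits, String.toList_ofList, Prod.mk.injEq, List.cons.injEq]
  refine ⟨?_, ?_, ?_, ?_⟩ <;> · congr 1; omega

-- B's carry step advances the digit vector from i to i + 1
theorem pvCarry_digits (i : Int) :
    pvCarry (pvDigits i) [4, 3, 2, 1] = pvDigits (i + 1) := by
  simp only [pvCarry, pvDigits, PySem.List.pySetD_natCast, PySem.List.pyGetD_natCast,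
    List.getD, List.set, List.getElem?_cons_zero, List.getElem?_cons_succ, Option.getD_some,
    PySem.List.pyGetD_zero]
  have hset : PySem.List.pySetD [i / 456976, 0, 0, 0, 0] 0 (i / 456976 + 1)
      = [i / 456976 + 1, 0, 0, 0, 0] := by
    simp [PySem.List.pySetD, PySem.List.pySet?, PySem.List.pyIdx?]
  simp only [hset]
  split_ifs <;> simp only [List.cons.injEq] <;>
    refine ⟨?_, ?_, ?_, ?_, ?_, trivial⟩ <;> omega

-- both folds over range(n) produce the same map of rows, by induction on n
theorem pvMain (n : Nat) (hn : (n : Int) ≤ 11881376) :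
    generateCourseIdList (n : Int) = generateCourseIdList_alt (n : Int) ∧
    ((PySem.List.pyRange 0 (n : Int) 1).foldl
      (fun (st : List String × List Int) _ =>
        (st.1 ++ [String.ofList (['0', '1'] ++ st.2.map (fun x => PySem.List.pyGetD pvUpper x 'A'))],
         pvCarry st.2 [4, 3, 2, 1]))
      ([], [0, 0, 0, 0, 0])).2 = pvDigits (n : Int) := by
  induction n with
  | zero =>
      constructor
      · rfl
      · decide
  | succ m ih =>
      obtain ⟨ihA, ihD⟩ := ih (by push_cast at hn ⊢; omega)
      have hsplit : PySem.List.pyRange 0 ((m : Int) + 1) 1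
          = PySem.List.pyRange 0 (m : Int) 1 ++ [(m : Int)] := by
        rw [PySem.List.pyRange_one_succ_right (by positivity)]
      constructor
      · show generateCourseIdList ((m : Int) + 1) = generateCourseIdList_alt ((m : Int) + 1)
        unfold generateCourseIdList generateCourseIdList_alt at ihA ⊢
        rw [hsplit, List.foldl_append, List.foldl_append]
        simp only [List.foldl]
        rw [pvInnerA (m : Int)]
        have : (((PySem.List.pyRange 0 (m : Int) 1).foldl
            (fun (st : List String × List Int) _ =>
              (st.1 ++ [String.ofList (['0', '1'] ++ st.2.map (fun x => PySem.List.pyGetD pvUpper x 'A'))],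
               pvCarry st.2 [4, 3, 2, 1]))
            ([], [0, 0, 0, 0, 0]))).2 = pvDigits (m : Int) := ihD
        rw [this, ihA]
        simp [pvRow]
      · show (((PySem.List.pyRange 0 ((m : Int) + 1) 1).foldl
            (fun (st : List String × List Int) _ =>
              (st.1 ++ [String.ofList (['0', '1'] ++ st.2.map (fun x => PySem.List.pyGetD pvUpper x 'A'))],
               pvCarry st.2 [4, 3, 2, 1]))
            ([], [0, 0, 0, 0, 0]))).2 = pvDigits ((m : Int) + 1)
        rw [hsplit, List.foldl_append]
        simp only [List.foldl]
        rw [ihD, pvCarry_digits (m : Int)]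

-- ===== VERDICT (by name: the statement is the Claim_ definition above) =====
theorem generateCourseIdList_spec : Claim_equal_generateCourseIdList := by
  intro c _ hpre
  unfold Pre_generateCourseIdList at hpre
  unfold Spec_generateCourseIdList
  by_cases hc : c ≤ 0
  · have hA : PySem.List.pyRange 0 c 1 = [] := PySem.List.pyRange_one_eq_nil hc
    unfold generateCourseIdList generateCourseIdList_alt
    rw [hA]; rfl
  · obtain ⟨n, rfl⟩ : ∃ n : Nat, c = (n : Int) := ⟨c.toNat, by omega⟩
    exact (pvMain n (by omega)).1
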